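-- pv_equiv track=rewrite | github.com/yenjie/Strangeness | MainAnalysis/20260218_KtoPiInversion/run_yi_independent_dndy.py | build_coarse_mapping
-- ===== SOURCE A (Python) =====
-- def build_coarse_mapping(n_act, n_p_fine, n_cos_fine, p_groups, cos_groups):
--     p_map = {p: i for i, group in enumerate(p_groups) for p in group}
--     cos_map = {c: i for i, group in enumerate(cos_groups) for c in group}
--     n_pc_fine = n_p_fine * n_cos_fine
--     n_pc_coarse = len(p_groups) * len(cos_groups)
--     fine_to_coarse = []
--     for iflat in range(n_act * n_pc_fine):
--         act = iflat // n_pc_fine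
--         rem = iflat % n_pc_fine
--         p_bin = rem // n_cos_fine
--         cos_bin = rem % n_cos_fine
--         coarse = (act * n_pc_coarse) + (p_map[p_bin] * len(cos_groups)) + cos_map[cos_bin]
--         fine_to_coarse.append(coarse)
--     return fine_to_coarse, len(p_groups), len(cos_groups), n_act * n_pc_coarse
-- ===== SOURCE B (Python) =====
-- def build_coarse_mapping(n_act, n_p_fine, n_cos_fine, p_groups, cos_groups):
--     p_map = {p: i for i, group in enumerate(p_groups) for p in group}
--     cos_map = {c: i for i, group in enumerate(cos_groups) for c in group}
--     n_coarse_cos = len(cos_groups)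
--     n_pc_coarse = len(p_groups) * n_coarse_cos
--     fine_to_coarse = []
--     if n_p_fine > 0 and n_cos_fine > 0:
--         for act in range(n_act):
--             for p_bin in range(n_p_fine):
--                 for cos_bin in range(n_cos_fine):
--                     fine_to_coarse.append(act * n_pc_coarse
--                                           + p_map[p_bin] * n_coarse_cos
--                                           + cos_map[cos_bin])
--     return fine_to_coarse, len(p_groups), n_coarse_cos, n_act * n_pc_coarse
-- ===== Notes on version B (the rewrite author's own statement) =====
-- stated objective: simpler
-- what changed: Replaces the flat loop over one combined index decoded by // and % with three nested loops over the act/p/cos dimensions, appending the coarse index directly in the same order, so all divmod index arithmetic disappears.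
-- outside the precondition, e.g. on build_coarse_mapping(2, -1, -1, [[0]], [[0]]): A returns ([0, 1], 1, 1, 2), B returns ([], 1, 1, 2)
import Mathlib
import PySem

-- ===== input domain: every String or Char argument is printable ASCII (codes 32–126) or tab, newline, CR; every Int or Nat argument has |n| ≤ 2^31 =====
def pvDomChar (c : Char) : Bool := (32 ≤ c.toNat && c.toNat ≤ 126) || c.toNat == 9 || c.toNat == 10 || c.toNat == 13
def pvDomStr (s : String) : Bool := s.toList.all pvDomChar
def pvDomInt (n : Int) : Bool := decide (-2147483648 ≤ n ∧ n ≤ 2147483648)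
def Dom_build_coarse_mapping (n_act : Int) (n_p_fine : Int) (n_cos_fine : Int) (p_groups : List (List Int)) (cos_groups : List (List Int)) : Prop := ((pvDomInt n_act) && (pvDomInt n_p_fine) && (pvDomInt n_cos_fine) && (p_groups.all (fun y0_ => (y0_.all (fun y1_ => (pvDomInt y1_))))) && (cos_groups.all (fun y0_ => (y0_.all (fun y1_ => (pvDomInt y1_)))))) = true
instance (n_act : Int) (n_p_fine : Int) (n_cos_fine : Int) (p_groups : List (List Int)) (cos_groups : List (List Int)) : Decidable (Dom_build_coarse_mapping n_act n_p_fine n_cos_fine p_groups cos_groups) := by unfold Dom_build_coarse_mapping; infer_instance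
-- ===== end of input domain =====

-- ===== PORT A =====
-- B replaces the flat divmod-decoded loop by three nested loops over the dimensions (objective: simpler).
-- Shared helper: both Pythons build p_map/cos_map with the identical dict comprehension
-- {p: i for i, group in enumerate(groups) for p in group} (later groups overwrite).
def pvMkMap (groups : List (List Int)) : PySem.Dict Int Int :=
  (PySem.List.enumerate groups).foldl
    (fun d ig => ig.2.foldl (fun d p => d.insert p ig.1) d) PySem.Dict.empty

-- Python's p_map[p_bin] raises KeyError on a missing key; those inputs are excluded by
-- Pre_build_coarse_mapping, so the .getD _ 0 below is exact on every admitted input.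
def build_coarse_mapping (n_act : Int) (n_p_fine : Int) (n_cos_fine : Int) (p_groups : List (List Int)) (cos_groups : List (List Int)) : List Int × Int × Int × Int :=
  let p_map := pvMkMap p_groups
  let cos_map := pvMkMap cos_groups
  let n_pc_fine := n_p_fine * n_cos_fine
  let n_pc_coarse : Int := (p_groups.length : Int) * (cos_groups.length : Int)
  let fine_to_coarse :=
    (PySem.List.pyRange 0 (n_act * n_pc_fine) 1).foldl (fun acc iflat =>
      let act := PySem.Int.floordiv iflat n_pc_fine
      let rem := PySem.Int.mod iflat n_pc_fine
      let p_bin := PySem.Int.floordiv rem n_cos_fine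
      let cos_bin := PySem.Int.mod rem n_cos_fine
      let coarse := act * n_pc_coarse + (p_map.getD p_bin 0) * (cos_groups.length : Int) + cos_map.getD cos_bin 0
      acc ++ [coarse]) []
  (fine_to_coarse, (p_groups.length : Int), (cos_groups.length : Int), n_act * n_pc_coarse)

-- ===== PORT B =====
-- B skips the loops entirely when an inner dimension is empty (nothing would ever be appended).
def build_coarse_mapping_alt (n_act : Int) (n_p_fine : Int) (n_cos_fine : Int) (p_groups : List (List Int)) (cos_groups : List (List Int)) : List Int × Int × Int × Int :=
  let p_map := pvMkMap p_groups
  let cos_map := pvMkMap cos_groups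
  let n_coarse_cos : Int := (cos_groups.length : Int)
  let n_pc_coarse : Int := (p_groups.length : Int) * n_coarse_cos
  let fine_to_coarse :=
    if 0 < n_p_fine ∧ 0 < n_cos_fine then
      (PySem.List.pyRange 0 n_act 1).foldl (fun acc act =>
        (PySem.List.pyRange 0 n_p_fine 1).foldl (fun acc p_bin =>
          (PySem.List.pyRange 0 n_cos_fine 1).foldl (fun acc cos_bin =>
            acc ++ [act * n_pc_coarse + (p_map.getD p_bin 0) * n_coarse_cos + cos_map.getD cos_bin 0]) acc) acc) []
    else []
  (fine_to_coarse, (p_groups.length : Int), n_coarse_cos, n_act * n_pc_coarse)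

-- ===== PRECONDITION & SPEC =====
-- Pre_ admits every input whose loop is empty (product of counts ≤ 0) and the natural positive-count
-- inputs whose fine bins are all covered by some group; it excludes the inputs where Python raises
-- KeyError (an uncovered fine bin with all counts positive; coverage is stated as 'the distinct
-- group elements inside [0, n) number exactly n') and the negative-count inputs whose
-- product is still positive, on which A's divmod loop returns an accidental value (see the cite).
def Pre_build_coarse_mapping (n_act : Int) (n_p_fine : Int) (n_cos_fine : Int) (p_groups : List (List Int)) (cos_groups : List (List Int)) : Prop :=
  n_act * (n_p_fine * n_cos_fine) ≤ 0 ∨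
  (0 < n_act ∧ 0 < n_p_fine ∧ 0 < n_cos_fine ∧
    ((((p_groups.flatten.dedup).filter (fun x => decide (0 ≤ x ∧ x < n_p_fine))).length : Int) = n_p_fine) ∧
    ((((cos_groups.flatten.dedup).filter (fun x => decide (0 ≤ x ∧ x < n_cos_fine))).length : Int) = n_cos_fine))
instance (n_act : Int) (n_p_fine : Int) (n_cos_fine : Int) (p_groups : List (List Int)) (cos_groups : List (List Int)) : Decidable (Pre_build_coarse_mapping n_act n_p_fine n_cos_fine p_groups cos_groups) := by unfold Pre_build_coarse_mapping; infer_instance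

def pvWitness_build_coarse_mapping : Int × Int × Int × List (List Int) × List (List Int) :=
  (1, 2, 2, [[0, 1]], [[0], [1]])

def Spec_build_coarse_mapping (n_act : Int) (n_p_fine : Int) (n_cos_fine : Int) (p_groups : List (List Int)) (cos_groups : List (List Int)) (out : List Int × Int × Int × Int) : Prop := out = build_coarse_mapping_alt n_act n_p_fine n_cos_fine p_groups cos_groups
instance (n_act : Int) (n_p_fine : Int) (n_cos_fine : Int) (p_groups : List (List Int)) (cos_groups : List (List Int)) (out : List Int × Int × Int × Int) : Decidable (Spec_build_coarse_mapping n_act n_p_fine n_cos_fine p_groups cos_groups out) := by unfold Spec_build_coarse_mapping; infer_instance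

-- ===== CLAIM (what is proved, stated in full; the proofs are below) =====
def Claim_equal_build_coarse_mapping : Prop := ∀ (n_act : Int) (n_p_fine : Int) (n_cos_fine : Int) (p_groups : List (List Int)) (cos_groups : List (List Int)), Dom_build_coarse_mapping n_act n_p_fine n_cos_fine p_groups cos_groups → Pre_build_coarse_mapping n_act n_p_fine n_cos_fine p_groups cos_groups → Spec_build_coarse_mapping n_act n_p_fine n_cos_fine p_groups cos_groups (build_coarse_mapping n_act n_p_fine n_cos_fine p_groups cos_groups)

-- ===== LEMMAS AND PROOFS =====

theorem pv_witness_ok : Dom_build_coarse_mapping 1 2 2 [[0, 1]] [[0], [1]] ∧ Pre_build_coarse_mapping 1 2 2 [[0, 1]] [[0], [1]] := by decide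

theorem pv_div_decomp (q x r : Nat) (hr : r < q) : (q * x + r) / q = x := by
  rw [Nat.mul_add_div (by omega)]
  simp [Nat.div_eq_of_lt hr]

theorem pv_mod_decomp (q x r : Nat) (hr : r < q) : (q * x + r) % q = r := by
  rw [Nat.mul_add_mod]
  exact Nat.mod_eq_of_lt hr

theorem pv_range_mul (a p : Nat) :
    List.range (a * p) = (List.range a).flatMap (fun x => (List.range p).map (fun y => x * p + y)) := by
  induction a with
  | zero => simp
  | succ n ih =>
      rw [Nat.succ_mul, List.range_add, List.range_succ, List.flatMap_append, ih]
      simp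

theorem pv_flatMap_congr {α β : Type} (l : List α) (f g : α → List β)
    (h : ∀ x ∈ l, f x = g x) : l.flatMap f = l.flatMap g := by
  induction l with
  | nil => rfl
  | cons x xs ih =>
      simp only [List.flatMap_cons]
      rw [h x (by simp), ih (fun y hy => h y (by simp [hy]))]

theorem build_coarse_mapping_spec : Claim_equal_build_coarse_mapping := by
  intro n_act n_p_fine n_cos_fine p_groups cos_groups _ hpre
  unfold Spec_build_coarse_mapping build_coarse_mapping build_coarse_mapping_alt
  rcases hpre with hle | ⟨ha, hp, hc, -⟩
  · -- empty loop on both sides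
    simp only []
    refine Prod.ext ?_ rfl
    rw [PySem.List.pyRange_one_eq_nil (by omega : n_act * (n_p_fine * n_cos_fine) ≤ 0)]
    rcases (by omega : n_act ≤ 0 ∨ 0 < n_act) with h1 | h1
    · by_cases hpc : 0 < n_p_fine ∧ 0 < n_cos_fine
      · rw [if_pos hpc, PySem.List.pyRange_one_eq_nil (by omega : n_act ≤ 0)]
        simp
      · rw [if_neg hpc]
        simp
    · have hnpc : ¬ (0 < n_p_fine ∧ 0 < n_cos_fine) := by
        rintro ⟨h2, h3⟩
        exact absurd hle (not_le.mpr (mul_pos h1 (mul_pos h2 h3)))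
      rw [if_neg hnpc]
      simp
  obtain ⟨a, rfl⟩ : ∃ a : Nat, n_act = (a : Int) := ⟨n_act.toNat, (Int.toNat_of_nonneg (by omega)).symm⟩
  obtain ⟨p, rfl⟩ : ∃ p : Nat, n_p_fine = (p : Int) := ⟨n_p_fine.toNat, (Int.toNat_of_nonneg (by omega)).symm⟩
  obtain ⟨c, rfl⟩ : ∃ c : Nat, n_cos_fine = (c : Int) := ⟨n_cos_fine.toNat, (Int.toNat_of_nonneg (by omega)).symm⟩
  set P : Int → Int := fun b => (pvMkMap p_groups).getD b 0 with hP
  set C : Int → Int := fun b => (pvMkMap cos_groups).getD b 0 with hC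
  set K : Int := (p_groups.length : Int) * (cos_groups.length : Int) with hK
  set L : Int := (cos_groups.length : Int) with hL
  simp only []
  refine Prod.ext ?_ rfl
  rw [if_pos (And.intro hp hc)]
  simp only [PySem.List.foldl_append_singleton_eq_map, PySem.List.foldl_append_eq_flatMap,
    List.nil_append]
  have hcast : (a : Int) * ((p : Int) * (c : Int)) = ((a * (p * c) : Nat) : Int) := by push_cast; ring
  rw [hcast, PySem.List.pyRange_zero_natCast, PySem.List.pyRange_zero_natCast,
    PySem.List.pyRange_zero_natCast, PySem.List.pyRange_zero_natCast,
    pv_range_mul a (p * c)]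
  simp only [List.map_flatMap, List.map_map, List.flatMap_map]
  refine pv_flatMap_congr _ _ _ ?_
  intro x hx
  rw [pv_range_mul p c]
  simp only [List.map_flatMap, List.map_map]
  refine pv_flatMap_congr _ _ _ ?_
  intro y hy
  refine List.map_congr_left ?_
  intro z hz
  have hyp : y < p := List.mem_range.mp hy
  have hzc : z < c := List.mem_range.mp hz
  have hrlt : y * c + z < p * c := by
    calc y * c + z < y * c + c := by omega
    _ = (y + 1) * c := by ring
    _ ≤ p * c := Nat.mul_le_mul_right c (by omega)
  simp only [Function.comp]
  have h1 : (p : Int) * (c : Int) = ((p * c : Nat) : Int) := by push_cast; ring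
  have h2 : ((x * (p * c) + (y * c + z) : Nat) : Int) = (((p * c) * x + (y * c + z) : Nat) : Int) := by
    push_cast; ring
  rw [h1, h2, PySem.Int.floordiv_natCast, PySem.Int.mod_natCast,
    pv_div_decomp _ _ _ hrlt, pv_mod_decomp _ _ _ hrlt]
  have h3 : ((y * c + z : Nat) : Int) = ((c * y + z : Nat) : Int) := by push_cast; ring
  rw [h3, PySem.Int.floordiv_natCast, PySem.Int.mod_natCast,
    pv_div_decomp _ _ _ hzc, pv_mod_decomp _ _ _ hzc]

-- ===== VERDICT (by name: the statement is the Claim_ definition above) =====
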